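-- pv_equiv track=rewrite | github.com/MmAaXx500/dt-move | dtmove/dtmove.py | find_bases
-- ===== SOURCE A (Python) =====
-- from typing import Dict, List, Tuple
--
-- def find_bases(paths: list, bases: Dict[str, List[str]]) -> Dict[str, List[str]]:
--     """Find and return possible directories which can be rewritten by user"""
--     start_len = len(bases)
--
--     path: str
--     for path in paths:
--         if ":" in path:
--             cutoff = path.rfind('\\')
--         else:
--             cutoff = path.rfind('/')
--
--         tree = bases.get(path[:cutoff], [])
--
--         if cutoff > 0 and path not in tree:
--             tree.append(path)
--             bases[path[:cutoff]] = tree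
--
--     if start_len < len(bases):
--         bases = find_bases(list(bases.keys()), bases)
--
--     return bases
-- ===== SOURCE B (Python) =====
-- from typing import Dict, List
--
--
-- def _drain(queue: List[str], bases: Dict[str, List[str]], chain: bool) -> None:
--     """Process queue items FIFO; in chain mode a newly created parent joins the queue."""
--     i = 0
--     while i < len(queue):
--         path = queue[i]
--         i += 1
--         cutoff = path.rfind('\\') if ':' in path else path.rfind('/')
--         parent = path[:cutoff]
--         tree = bases.get(parent, [])
--         if cutoff > 0 and path not in tree:
--             fresh = parent not in bases
--             tree.append(path)
--             bases[parent] = tree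
--             if chain and fresh:
--                 queue.append(parent)
--
--
-- def find_bases(paths: list, bases: Dict[str, List[str]]) -> Dict[str, List[str]]:
--     """Find and return possible directories which can be rewritten by user"""
--     n0 = len(bases)
--     _drain(list(paths), bases, False)
--     if len(bases) > n0:
--         _drain(list(bases.keys()), bases, True)
--     return bases
-- ===== Notes on version B (the rewrite author's own statement) =====
-- stated objective: alternative
-- what changed: A's self-recursion that re-walks the whole key list round after round is replaced by a single FIFO worklist drain in which a newly created parent key is enqueued immediately, so every key is visited once instead of once per remaining round; proved equivalent via a settled-keys invariant and a fuel/potential argument.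
import Mathlib
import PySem

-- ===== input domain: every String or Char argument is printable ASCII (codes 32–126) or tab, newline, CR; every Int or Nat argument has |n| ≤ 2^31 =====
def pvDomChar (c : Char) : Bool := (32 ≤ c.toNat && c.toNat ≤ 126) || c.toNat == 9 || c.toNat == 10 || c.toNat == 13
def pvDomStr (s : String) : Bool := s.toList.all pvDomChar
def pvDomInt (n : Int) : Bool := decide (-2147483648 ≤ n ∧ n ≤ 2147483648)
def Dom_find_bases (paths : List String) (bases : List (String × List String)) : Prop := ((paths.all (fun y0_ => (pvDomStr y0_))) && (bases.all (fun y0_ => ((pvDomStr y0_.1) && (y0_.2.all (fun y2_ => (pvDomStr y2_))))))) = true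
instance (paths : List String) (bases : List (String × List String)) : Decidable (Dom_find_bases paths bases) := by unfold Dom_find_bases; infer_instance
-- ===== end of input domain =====

-- B replaces A's self-recursion (which re-walks the WHOLE key list round after round)
-- by a single FIFO worklist drain in which a newly created parent key is enqueued
-- immediately, so every key is visited once (objective: alternative).
-- Both Pythons mutate `bases` in place identically; the theorems are about the return value.

-- ===== PORT A =====

-- one iteration of A's `for path in paths` body
def stepA (b : PySem.Dict String (List String)) (path : String) : PySem.Dict String (List String) :=
  let cutoff : Int :=
    if PySem.Str.isIn ":" path then PySem.Str.rfind path "\\" else PySem.Str.rfind path "/"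
  let parent : String := PySem.Str.slice path none (some cutoff)   -- path[:cutoff]
  let tree : List String := b.getD parent []
  if 0 < cutoff ∧ path ∉ tree then b.insert parent (tree ++ [path]) else b

-- A's recursion (fuel only makes the recursion structural; it is always sufficient:
-- every recursive call adds at least one key, and every key ever added is a proper
-- prefix of an input path or input key)
def goA (fuel : Nat) (paths : List String) (b : PySem.Dict String (List String)) :
    PySem.Dict String (List String) :=
  match fuel with
  | 0 => b
  | f + 1 =>
    let b2 := paths.foldl stepA b
    if b.size < b2.size then goA f b2.keys b2 else b2

def pvFuel (paths : List String) (bases : List (String × List String)) : Nat :=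
  (paths.map (fun s => s.toList.length)).sum + (bases.map (fun p => p.1.toList.length)).sum + 1

def find_bases (paths : List String) (bases : List (String × List String)) :
    List (String × List String) :=
  (goA (pvFuel paths bases + 1) paths (PySem.Dict.ofList bases)).items

-- ===== PORT B =====

-- fuel for B's `while i < len(queue)` drain (the loop only ever terminates; the fuel,
-- spent solely when a fresh parent is enqueued, makes the recursion structural)
def qFuel (paths : List String) (bases : List (String × List String)) : Nat :=
  ((paths ++ bases.map Prod.fst).map (fun s => s.toList.length)).sum + 1

-- B's `_drain`: walk the queue front to back; in chain mode a fresh parent joins the queue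
def drainB (fuel : Nat) (chain : Bool) (b : PySem.Dict String (List String)) :
    List String → PySem.Dict String (List String)
  | [] => b
  | path :: rest =>
    let cutoff : Int :=
      if PySem.Str.isIn ":" path then PySem.Str.rfind path "\\" else PySem.Str.rfind path "/"
    let parent : String := PySem.Str.slice path none (some cutoff)   -- path[:cutoff]
    let tree : List String := b.getD parent []
    if 0 < cutoff ∧ path ∉ tree then
      let fresh : Bool := ! b.contains parent
      let b2 := b.insert parent (tree ++ [path])
      if chain && fresh then
        match fuel with
        | 0 => b2
        | f + 1 => drainB f chain b2 (rest ++ [parent])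
      else drainB fuel chain b2 rest
    else drainB fuel chain b rest
termination_by q => (fuel, q.length)
decreasing_by
  · exact Prod.Lex.left _ _ (Nat.lt_succ_self _)
  · exact Prod.Lex.right _ (by simp)
  · exact Prod.Lex.right _ (by simp)

def find_bases_alt (paths : List String) (bases : List (String × List String)) :
    List (String × List String) :=
  let d := PySem.Dict.ofList bases
  let n0 := d.size
  let b1 := drainB (qFuel paths bases) false d paths
  if n0 < b1.size then (drainB (qFuel paths bases) true b1 b1.keys).items
  else b1.items

-- ===== PRECONDITION & SPEC =====
def Spec_find_bases (paths : List String) (bases : List (String × List String)) (out : List (String × List String)) : Prop := out = find_bases_alt paths bases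
instance (paths : List String) (bases : List (String × List String)) (out : List (String × List String)) : Decidable (Spec_find_bases paths bases out) := by unfold Spec_find_bases; infer_instance

-- ===== CLAIM (what is proved, stated in full; the proofs are below) =====
def Claim_equal_find_bases : Prop := ∀ (paths : List String) (bases : List (String × List String)), Dom_find_bases paths bases → Spec_find_bases paths bases (find_bases paths bases)

-- ===== LEMMAS AND PROOFS =====

-- the cutoff and parent a path is filed under
def cutoffOf (path : String) : Int :=
  if PySem.Str.isIn ":" path then PySem.Str.rfind path "\\" else PySem.Str.rfind path "/"

def parentOf (path : String) : String := PySem.Str.slice path none (some (cutoffOf path))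

-- a path is settled when processing it again would change nothing
def settled (b : PySem.Dict String (List String)) (path : String) : Prop :=
  ¬ (0 < cutoffOf path ∧ path ∉ b.getD (parentOf path) [])

-- total length of the strings in a queue (the potential that pays for every enqueue)
def sLen (q : List String) : Nat := (q.map (fun s => s.toList.length)).sum

theorem sLen_nil : sLen [] = 0 := rfl

theorem sLen_cons (p : String) (q : List String) :
    sLen (p :: q) = p.toList.length + sLen q := by
  simp only [sLen, List.map_cons, List.sum_cons]

theorem sLen_append (q1 q2 : List String) : sLen (q1 ++ q2) = sLen q1 + sLen q2 := by
  simp only [sLen, List.map_append, List.sum_append]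

theorem stepA_eq (b : PySem.Dict String (List String)) (p : String) :
    stepA b p = if 0 < cutoffOf p ∧ p ∉ b.getD (parentOf p) []
      then b.insert (parentOf p) (b.getD (parentOf p) [] ++ [p]) else b := rfl

theorem stepA_of_settled {b : PySem.Dict String (List String)} {p : String}
    (h : settled b p) : stepA b p = b := by
  rw [stepA_eq, if_neg h]

theorem mem_getD_stepA {b : PySem.Dict String (List String)} {k x : String}
    (p : String) (h : x ∈ b.getD k []) : x ∈ (stepA b p).getD k [] := by
  rw [stepA_eq]
  split
  · rw [PySem.Dict.getD_insert]
    split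
    · rename_i hk; subst hk; exact List.mem_append_left _ h
    · exact h
  · exact h

theorem settled_stepA {b : PySem.Dict String (List String)} {p : String}
    (x : String) (h : settled b p) : settled (stepA b x) p := by
  intro ⟨hc, hm⟩
  exact h ⟨hc, fun hmem => hm (mem_getD_stepA x hmem)⟩

theorem settled_foldl {b : PySem.Dict String (List String)} {p : String}
    (l : List String) (h : settled b p) : settled (l.foldl stepA b) p := by
  induction l generalizing b with
  | nil => exact h
  | cons x xs ih => exact ih (settled_stepA x h)

theorem stepA_settles (b : PySem.Dict String (List String)) (p : String) :
    settled (stepA b p) p := by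
  by_cases h : settled b p
  · rw [stepA_of_settled h]; exact h
  · rw [stepA_eq]
    rw [settled, not_not] at h
    rw [if_pos h]
    intro ⟨_, hm⟩
    rw [PySem.Dict.getD_insert, if_pos rfl] at hm
    exact hm (List.mem_append_right _ (List.mem_singleton.mpr rfl))

theorem foldl_settles (l : List String) (b : PySem.Dict String (List String)) :
    ∀ p ∈ l, settled (l.foldl stepA b) p := by
  induction l generalizing b with
  | nil => intro p hp; cases hp
  | cons x xs ih =>
    intro p hp
    rcases List.mem_cons.mp hp with h | h
    · subst h; exact settled_foldl xs (stepA_settles b p)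
    · exact ih (stepA b x) p h

theorem foldl_settled_id {l : List String} {b : PySem.Dict String (List String)}
    (h : ∀ p ∈ l, settled b p) : l.foldl stepA b = b := by
  induction l with
  | nil => rfl
  | cons x xs ih =>
    rw [List.foldl_cons, stepA_of_settled (h x List.mem_cons_self)]
    exact ih (fun p hp => h p (List.mem_cons_of_mem x hp))

theorem size_eq_keys_length (b : PySem.Dict String (List String)) :
    b.size = b.keys.length := by
  simp [PySem.Dict.size, PySem.Dict.keys]

-- rfind points at an occurrence, and is bounded by its third argument
theorem rfind_go_spec (s sub : List Char) (n : Nat)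
    (h : 0 ≤ PySem.Chars.rfind.go s sub n) :
    sub.isPrefixOf (s.drop (PySem.Chars.rfind.go s sub n).toNat) = true ∧
      PySem.Chars.rfind.go s sub n ≤ (n : Int) := by
  induction n with
  | zero =>
    rw [PySem.Chars.rfind.go.eq_1] at h ⊢
    split at h
    · rename_i hp
      rw [if_pos hp]
      refine ⟨by simpa using hp, by simp⟩
    · omega
  | succ j ih =>
    rw [PySem.Chars.rfind.go.eq_2] at h ⊢
    split at h
    · rename_i hp
      rw [if_pos hp]
      refine ⟨by simpa using hp, by simp⟩
    · rename_i hp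
      rw [if_neg hp]
      obtain ⟨h1, h2⟩ := ih h
      exact ⟨h1, by omega⟩

-- a found single-character needle sits strictly inside the string
theorem rfind_bound (p sub : String) (hsub : sub.toList.length = 1)
    (hpos : 0 < PySem.Str.rfind p sub) :
    (PySem.Str.rfind p sub).toNat + 1 ≤ p.toList.length ∧
    (PySem.Str.slice p none (some (PySem.Str.rfind p sub))).toList.length
      = (PySem.Str.rfind p sub).toNat := by
  have hr : PySem.Str.rfind p sub
      = PySem.Chars.rfind.go p.toList sub.toList p.toList.length := by
    rw [PySem.Str.rfind_eq]; rfl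
  obtain ⟨h1, h2⟩ := rfind_go_spec p.toList sub.toList p.toList.length
    (by rw [hr] at hpos; omega)
  have hpre := (PySem.Chars.startswith_iff _ _).mp h1
  have hlen := hpre.length_le
  simp only [List.length_drop, hsub] at hlen
  constructor
  · rw [hr] at hpos ⊢
    omega
  · rw [PySem.Str.toList_slice, PySem.Chars.slice_eq_listSlice,
      PySem.List.slice_to p.toList (le_of_lt hpos)]
    rw [hr] at hpos ⊢
    simp only [List.length_take]
    omega

-- a positive cutoff lies strictly inside the path, so the parent is strictly
-- shorter and exactly cutoff characters long
theorem parent_len {p : String} (h : 0 < cutoffOf p) :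
    (parentOf p).toList.length + 1 ≤ p.toList.length ∧
      (parentOf p).toList.length = (cutoffOf p).toNat := by
  by_cases hc : PySem.Str.isIn ":" p = true
  · simp only [cutoffOf, parentOf, hc, if_true] at h ⊢
    obtain ⟨h1, h2⟩ := rfind_bound p "\\" (by decide) h
    exact ⟨by omega, h2⟩
  · have hcf : PySem.Str.isIn ":" p = false := by
      cases hcc : PySem.Str.isIn ":" p <;> simp_all
    simp only [cutoffOf, parentOf, hcf, Bool.false_eq_true, if_false] at h ⊢
    obtain ⟨h1, h2⟩ := rfind_bound p "/" (by decide) h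
    exact ⟨by omega, h2⟩

-- the two length facts omega needs whenever an unsettled path is processed
theorem path_two_le {b : PySem.Dict String (List String)} {p : String}
    (h : 0 < cutoffOf p ∧ p ∉ b.getD (parentOf p) []) :
    (parentOf p).toList.length + 1 ≤ p.toList.length ∧ 2 ≤ p.toList.length := by
  obtain ⟨h1, h2⟩ := parent_len h.1
  have hcut := h.1
  omega

-- unfolding equations for B's drain
theorem drainB_nil (f : Nat) (c : Bool) (b : PySem.Dict String (List String)) :
    drainB f c b [] = b := by
  rw [drainB]

theorem drainB_cons_settled {b : PySem.Dict String (List String)} {p : String}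
    (f : Nat) (c : Bool) (rest : List String) (h : settled b p) :
    drainB f c b (p :: rest) = drainB f c b rest := by
  have h' : ¬ (0 < cutoffOf p ∧ p ∉ b.getD (parentOf p) []) := h
  unfold parentOf cutoffOf at h'
  rw [drainB, if_neg h']

theorem drainB_cons_ins_old {b : PySem.Dict String (List String)} {p : String}
    (f : Nat) (c : Bool) (rest : List String)
    (h : 0 < cutoffOf p ∧ p ∉ b.getD (parentOf p) [])
    (hc : b.contains (parentOf p) = true) :
    drainB f c b (p :: rest) = drainB f c (stepA b p) rest := by
  have h' := h
  unfold parentOf cutoffOf at h'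
  have hc' := hc
  unfold parentOf cutoffOf at hc'
  rw [drainB, if_pos h', hc']
  rw [stepA_eq, if_pos h]
  unfold parentOf cutoffOf
  simp

theorem drainB_cons_ins_false {b : PySem.Dict String (List String)} {p : String}
    (f : Nat) (rest : List String)
    (h : 0 < cutoffOf p ∧ p ∉ b.getD (parentOf p) []) :
    drainB f false b (p :: rest) = drainB f false (stepA b p) rest := by
  have h' := h
  unfold parentOf cutoffOf at h'
  rw [drainB, if_pos h']
  rw [stepA_eq, if_pos h]
  unfold parentOf cutoffOf
  simp

theorem drainB_cons_ins_fresh {b : PySem.Dict String (List String)} {p : String}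
    (f : Nat) (rest : List String)
    (h : 0 < cutoffOf p ∧ p ∉ b.getD (parentOf p) [])
    (hc : b.contains (parentOf p) = false) :
    drainB (f + 1) true b (p :: rest)
      = drainB f true (stepA b p) (rest ++ [parentOf p]) := by
  have h' := h
  unfold parentOf cutoffOf at h'
  have hc' := hc
  unfold parentOf cutoffOf at hc'
  rw [drainB, if_pos h', hc']
  rw [stepA_eq, if_pos h]
  unfold parentOf cutoffOf
  simp

-- with chaining off, the drain is exactly one `for` pass
theorem drainB_false (q : List String) (f : Nat) (b : PySem.Dict String (List String)) :
    drainB f false b q = q.foldl stepA b := by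
  induction q generalizing b with
  | nil => exact drainB_nil f false b
  | cons p rest ih =>
    by_cases h : 0 < cutoffOf p ∧ p ∉ b.getD (parentOf p) []
    · rw [drainB_cons_ins_false f rest h, List.foldl_cons, ih]
    · rw [drainB_cons_settled f false rest h, List.foldl_cons, stepA_of_settled h, ih]

-- one round of the queue: the dict advances by a fold, the fresh keys queue up behind
theorem drainB_round (l : List String) :
    ∀ (b : PySem.Dict String (List String)) (extra : List String) (f : Nat),
      sLen l + sLen extra ≤ f →
      ∃ new, (l.foldl stepA b).keys = b.keys ++ new ∧
        sLen new + new.length ≤ sLen l ∧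
        drainB f true b (l ++ extra)
          = drainB (f - new.length) true (l.foldl stepA b) (extra ++ new) := by
  induction l with
  | nil =>
    intro b extra f _
    exact ⟨[], by simp, by simp [sLen_nil], by simp⟩
  | cons p l' ih =>
    intro b extra f hf
    rw [sLen_cons] at hf
    by_cases h : 0 < cutoffOf p ∧ p ∉ b.getD (parentOf p) []
    · obtain ⟨hpl, hp2⟩ := path_two_le h
      by_cases hc : b.contains (parentOf p) = true
      · rw [List.cons_append, drainB_cons_ins_old f true _ h hc]
        obtain ⟨new, hk, hle, heq⟩ := ih (stepA b p) extra f (by omega)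
        refine ⟨new, ?_, by rw [sLen_cons]; omega, by rw [List.foldl_cons]; exact heq⟩
        rw [List.foldl_cons, hk, stepA_eq, if_pos h,
          PySem.Dict.keys_insert_of_contains _ _ hc]
      · have hc' : b.contains (parentOf p) = false := by
          cases hcc : b.contains (parentOf p) <;> simp_all
        obtain ⟨f', rfl⟩ : ∃ f', f = f' + 1 := ⟨f - 1, by omega⟩
        rw [List.cons_append, drainB_cons_ins_fresh f' _ h hc',
          List.append_assoc]
        obtain ⟨new', hk, hle, heq⟩ := ih (stepA b p) (extra ++ [parentOf p]) f' (by
          rw [sLen_append, sLen_cons, sLen_nil]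
          omega)
        refine ⟨parentOf p :: new', ?_, ?_, ?_⟩
        · rw [List.foldl_cons, hk, stepA_eq, if_pos h,
            PySem.Dict.keys_insert_of_not_contains _ _ hc']
          simp
        · rw [sLen_cons, sLen_cons, List.length_cons]
          omega
        · rw [List.foldl_cons]
          have hfl : f' + 1 - (parentOf p :: new').length = f' - new'.length := by
            simp only [List.length_cons]
            omega
          rw [hfl, heq, List.append_assoc]
          simp
    · rw [List.cons_append, drainB_cons_settled f true _ h, List.foldl_cons,
        stepA_of_settled h]
      obtain ⟨new, hk, hle, heq⟩ := ih b extra f (by omega)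
      exact ⟨new, hk, by rw [sLen_cons]; omega, heq⟩

-- A's rounds compute what B's chained drain computes
theorem goA_eq_drain (f : Nat) :
    ∀ (l1 l2 : List String) (b : PySem.Dict String (List String)) (g : Nat),
      (∀ p ∈ l1, settled b p) → b.keys = l1 ++ l2 →
      sLen l2 + 1 ≤ f → sLen l2 ≤ g →
      goA f (l1 ++ l2) b = drainB g true b l2 := by
  induction f with
  | zero => intro _ _ _ _ _ _ hf _; omega
  | succ f ih =>
    intro l1 l2 b g hs hk hf hg
    rw [goA]
    simp only [List.foldl_append, foldl_settled_id hs]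
    obtain ⟨new, hkeys, hle, heq⟩ := drainB_round l2 b [] g (by rw [sLen_nil]; omega)
    simp only [List.append_nil, List.nil_append] at heq
    have hsz : (l2.foldl stepA b).size = b.size + new.length := by
      rw [size_eq_keys_length, size_eq_keys_length, hkeys, List.length_append]
    match new, hkeys, hle, heq, hsz with
    | [], hkeys, hle, heq, hsz =>
      rw [if_neg (by simp at hsz; omega)]
      rw [heq, drainB_nil]
    | y :: ys, hkeys, hle, heq, hsz =>
      rw [if_pos (by simp at hsz; omega)]
      rw [heq]
      have hknew : (l2.foldl stepA b).keys = (l1 ++ l2) ++ (y :: ys) := by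
        rw [hkeys, hk]
      rw [hknew]
      refine ih (l1 ++ l2) (y :: ys) (l2.foldl stepA b) (g - (y :: ys).length)
        ?_ hknew ?_ ?_
      · intro p hp
        rcases List.mem_append.mp hp with hmem | hmem
        · exact settled_foldl l2 (hs p hmem)
        · exact foldl_settles l2 b p hmem
      · rw [sLen_cons] at hle ⊢
        simp only [List.length_cons] at hle
        omega
      · rw [sLen_cons] at hle ⊢
        simp only [List.length_cons] at hle ⊢
        omega

-- the keys of ofList are a deduplication of the listed keys
theorem set_update_sublist (xs : List String) :
    ∀ s : List String, (PySem.Set.update s xs).Sublist (s ++ xs) := by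
  induction xs with
  | nil => intro s; simp [PySem.Set.update]
  | cons x xs ih =>
    intro s
    have hstep : PySem.Set.update s (x :: xs) = PySem.Set.update (PySem.Set.add s x) xs :=
      rfl
    rw [hstep]
    refine (ih (PySem.Set.add s x)).trans ?_
    unfold PySem.Set.add
    split
    · exact (List.sublist_cons_self x xs).append_left s
    · rw [List.append_assoc]
      simp

theorem sLen_keys_ofList (bases : List (String × List String)) :
    sLen (PySem.Dict.ofList bases).keys ≤ sLen (bases.map Prod.fst) := by
  have hk : (PySem.Dict.ofList bases).keys
      = PySem.Set.update (PySem.Dict.empty : PySem.Dict String (List String)).keys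
          (bases.map Prod.fst) :=
    PySem.Dict.keys_foldl_insert_key bases (Prod.fst) (fun _ p => p.2)
      (PySem.Dict.empty : PySem.Dict String (List String))
  rw [hk]
  have hsub : (PySem.Set.update
      (PySem.Dict.empty : PySem.Dict String (List String)).keys
      (bases.map Prod.fst)).Sublist (bases.map Prod.fst) := by
    simpa [PySem.Dict.keys_empty] using
      set_update_sublist (bases.map Prod.fst)
        (PySem.Dict.empty : PySem.Dict String (List String)).keys
  exact List.Sublist.sum_le_sum (hsub.map _) (by simp)

-- ===== VERDICT (by name: the statement is the Claim_ definition above) =====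
theorem find_bases_spec : Claim_equal_find_bases := by
  intro paths bases _
  unfold Spec_find_bases find_bases find_bases_alt
  simp only [drainB_false]
  rw [goA]
  set d := PySem.Dict.ofList bases with hd
  set b1 := paths.foldl stepA d with hb1
  obtain ⟨new, hkeys, hle, _⟩ :=
    drainB_round paths d [] (sLen paths) (by rw [sLen_nil]; omega)
  rw [← hb1] at hkeys
  have hsz : b1.size = d.size + new.length := by
    rw [size_eq_keys_length, size_eq_keys_length, hkeys, List.length_append]
  have hslkeys : sLen b1.keys = sLen d.keys + sLen new := by
    rw [hkeys, sLen_append]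
  have hbound : sLen b1.keys ≤ sLen paths + sLen (bases.map Prod.fst) := by
    have hof := sLen_keys_ofList bases
    rw [← hd] at hof
    omega
  have hpv : pvFuel paths bases = sLen paths + sLen (bases.map Prod.fst) + 1 := by
    simp only [pvFuel, sLen, List.map_map]
    rfl
  have hq : qFuel paths bases = sLen paths + sLen (bases.map Prod.fst) + 1 := by
    simp [qFuel, sLen, List.map_append]
  match new, hkeys, hle, hsz, hslkeys with
  | [], hkeys, hle, hsz, hslkeys =>
    simp only [List.length_nil, Nat.add_zero] at hsz
    rw [if_neg (by omega), if_neg (by omega)]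
  | y :: ys, hkeys, hle, hsz, hslkeys =>
    simp only [List.length_cons] at hsz
    rw [if_pos (by omega), if_pos (by omega)]
    congr 1
    have hmain := goA_eq_drain (pvFuel paths bases) [] b1.keys b1 (qFuel paths bases)
      (by intro p hp; cases hp) (by simp) (by omega) (by omega)
    simpa using hmain
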